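-- pv_equiv track=rewrite | github.com/Abraxas1010/rational-kan-hz | src/rkan_hz/rkan_symbolic_extract.py | _pattern_overlap
-- ===== SOURCE A (Python) =====
-- def _pattern_overlap(left: tuple, right: tuple):
--     """Return the overlap prefix/suffix between two agent-sequence patterns, or None.
--
--     An overlap exists when a suffix of ``left`` equals a prefix of ``right``
--     (non-empty), or when ``left`` is a substring of ``right`` (or vice versa).
--     The return value is the overlapping token tuple, or None when disjoint.
--     """
--     max_k = min(len(left), len(right))
--     for k in range(max_k, 0, -1):
--         if left[-k:] == right[:k]:
--             return list(left[-k:])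
--     if len(left) < len(right):
--         for i in range(len(right) - len(left) + 1):
--             if right[i:i + len(left)] == left:
--                 return list(left)
--     elif len(right) < len(left):
--         for i in range(len(left) - len(right) + 1):
--             if left[i:i + len(right)] == right:
--                 return list(right)
--     return None
-- ===== SOURCE B (Python) =====
-- def _pattern_overlap(left: tuple, right: tuple):
--     """Return the overlap prefix/suffix between two agent-sequence patterns, or None.
--
--     Single forward pass over ``right``: grow its prefix token by token and
--     remember the longest prefix that is also a suffix of ``left``; fall back
--     to a peel-based substring check when no suffix/prefix overlap exists.
--     """
--     best = None
--     p = []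
--     for tok in right:
--         p = p + [tok]
--         if len(p) <= len(left) and list(left[len(left) - len(p):]) == p:
--             best = p
--     if best is not None:
--         return list(best)
--     if len(left) < len(right):
--         if _contains(left, right):
--             return list(left)
--     elif len(right) < len(left):
--         if _contains(right, left):
--             return list(right)
--     return None
--
--
-- def _contains(small, big):
--     """True iff ``small`` occurs contiguously in ``big`` (peel from the front)."""
--     b = list(big)
--     small = list(small)
--     while True:
--         if b[:len(small)] == small:
--             return True
--         if not b:
--             return False
--         b = b[1:]
-- ===== Notes on version B (the rewrite author's own statement) =====
-- stated objective: alternative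
-- what changed: Replaced A's descending loop over negative-index slice comparisons by a single forward fold over `right` that grows its prefix and remembers the longest prefix that is a suffix of `left`, and replaced A's index-based containment scans by a structural peel-from-the-front substring check.
import Mathlib
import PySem

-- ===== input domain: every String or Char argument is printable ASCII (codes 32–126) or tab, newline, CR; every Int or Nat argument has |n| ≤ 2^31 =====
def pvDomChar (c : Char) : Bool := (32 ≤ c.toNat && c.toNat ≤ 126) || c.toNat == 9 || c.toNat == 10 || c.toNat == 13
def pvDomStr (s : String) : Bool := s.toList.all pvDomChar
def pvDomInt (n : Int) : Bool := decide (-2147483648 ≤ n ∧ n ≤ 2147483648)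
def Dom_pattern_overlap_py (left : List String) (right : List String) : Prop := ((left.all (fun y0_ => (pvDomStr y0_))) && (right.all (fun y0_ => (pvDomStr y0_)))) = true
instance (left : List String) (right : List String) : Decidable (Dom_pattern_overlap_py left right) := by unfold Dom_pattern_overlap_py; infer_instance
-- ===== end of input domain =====

-- B replaces A's descending slice scan by a single forward pass over `right` that remembers the
-- longest prefix of `right` that is a suffix of `left`, and A's index-loop containment scans by a
-- structural peel-from-the-front check (objective: alternative decomposition, same asymptotic cost).

-- ===== PORT A =====
-- for k in range(max_k, 0, -1): if left[-k:] == right[:k]: return list(left[-k:])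
def aOver (left right : List String) : Nat → Option (List String)
  | 0 => none
  | (k+1) =>
    if PySem.List.slice left (some (-((k+1 : Nat) : Int))) none
         = PySem.List.slice right none (some ((k+1 : Nat) : Int))
    then some (PySem.List.slice left (some (-((k+1 : Nat) : Int))) none)
    else aOver left right k

-- for i in range(cnt): if big[i:i+len(small)] == small: return list(small)   (cnt = len(big)-len(small)+1)
def aScan (big small : List String) : Nat → Nat → Option (List String)
  | _, 0 => none
  | i, (c+1) =>
    if PySem.List.slice big (some (i : Int)) (some ((i : Int) + (small.length : Int))) = small
    then some small
    else aScan big small (i + 1) c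

def pattern_overlap_py (left : List String) (right : List String) : Option (List String) :=
  match aOver left right (min left.length right.length) with
  | some r => some r
  | none =>
    if left.length < right.length then aScan right left 0 (right.length - left.length + 1)
    else if right.length < left.length then aScan left right 0 (left.length - right.length + 1)
    else none

-- ===== PORT B =====
-- loop body: p = p + [tok]; if len(p) <= len(left) and list(left[len(left)-len(p):]) == p: best = p
-- (the slice has a nonnegative start, hence List.drop is exact)
def bStep (left : List String) (st : List String × Option (List String)) (tok : String) :
    List String × Option (List String) :=
  let p := st.1 ++ [tok]
  (p, if p.length ≤ left.length ∧ left.drop (left.length - p.length) = p then some p else st.2)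

-- while True: if b[:len(small)] == small: return True;  if not b: return False;  b = b[1:]
def bContains (small : List String) : List String → Bool
  | [] => if List.take small.length ([] : List String) = small then true else false
  | x :: t => if List.take small.length (x :: t) = small then true else bContains small t

def pattern_overlap_py_alt (left : List String) (right : List String) : Option (List String) :=
  match (right.foldl (bStep left) ([], none)).2 with
  | some p => some p
  | none =>
    if left.length < right.length then (if bContains left right then some left else none)
    else if right.length < left.length then (if bContains right left then some right else none)
    else none

-- ===== PRECONDITION & SPEC =====
def Spec_pattern_overlap_py (left : List String) (right : List String) (out : Option (List String)) : Prop := out = pattern_overlap_py_alt left right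
instance (left : List String) (right : List String) (out : Option (List String)) : Decidable (Spec_pattern_overlap_py left right out) := by unfold Spec_pattern_overlap_py; infer_instance

-- ===== CLAIM (what is proved, stated in full; the proofs are below) =====
def Claim_equal_pattern_overlap_py : Prop := ∀ (left : List String) (right : List String), Dom_pattern_overlap_py left right → Spec_pattern_overlap_py left right (pattern_overlap_py left right)

-- ===== LEMMAS AND PROOFS =====

-- descending search for the largest k in (lo, lo+cnt] with left[-k:] == right[:k] (k ≤ len(left) demanded)
def du (left right : List String) (lo : Nat) : Nat → Option (List String)
  | 0 => none
  | (c+1) =>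
    if (lo + c + 1) ≤ left.length ∧ left.drop (left.length - (lo + c + 1)) = right.take (lo + c + 1)
    then some (right.take (lo + c + 1))
    else du left right lo c

-- A's descending loop is du over (0, k], for k within both lengths
theorem aOver_eq_du (left right : List String) (k : Nat)
    (hk : k ≤ min left.length right.length) :
    aOver left right k = du left right 0 k := by
  induction k with
  | zero => rfl
  | succ c ih =>
    have h1 : 0 < c + 1 := Nat.succ_pos c
    have hle : c + 1 ≤ left.length := le_trans hk (Nat.min_le_left _ _)
    rw [aOver, du, PySem.List.slice_from_neg_natCast left (c+1) h1,
        PySem.List.slice_to_natCast right (c+1)]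
    have h0 : 0 + c + 1 = c + 1 := by omega
    rw [h0]
    by_cases h : left.drop (left.length - (c+1)) = right.take (c+1)
    · simp [h, hle]
    · simp [h, hle, ih (le_trans (Nat.le_succ c) hk)]

-- every k above min(len left, len right) fails the test, so du can start at len(right)
theorem du_high (left right : List String) (k : Nat)
    (hk : min left.length right.length ≤ k) :
    du left right 0 k = du left right 0 (min left.length right.length) := by
  induction k with
  | zero => have : min left.length right.length = 0 := Nat.le_zero.mp hk; rw [this]
  | succ c ih =>
    rcases Nat.lt_or_ge c (min left.length right.length) with h | h
    · have : min left.length right.length = c + 1 := by omega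
      rw [this]
    · rw [du]
      have hfail : ¬ ((0 + c + 1) ≤ left.length ∧
          left.drop (left.length - (0 + c + 1)) = right.take (0 + c + 1)) := by
        rintro ⟨h1, h2⟩
        have hlen := congrArg List.length h2
        simp [List.length_drop, List.length_take] at hlen
        omega
      rw [if_neg hfail]
      exact ih h

-- bottom-peel of the descending search
theorem du_peel (left right : List String) (lo cnt : Nat) :
    du left right lo (cnt + 1)
      = match du left right (lo + 1) cnt with
        | some v => some v
        | none =>
          if (lo + 1) ≤ left.length ∧ left.drop (left.length - (lo + 1)) = right.take (lo + 1)
          then some (right.take (lo + 1)) else none := by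
  induction cnt with
  | zero =>
    simp only [du]
  | succ c ih =>
    have e : lo + 1 + c + 1 = lo + (c + 1) + 1 := by omega
    rw [du]
    conv_rhs => rw [du]
    rw [e, ih]
    by_cases h : (lo + (c+1) + 1) ≤ left.length ∧
        left.drop (left.length - (lo + (c+1) + 1)) = right.take (lo + (c+1) + 1)
    · rw [if_pos h, if_pos h]
    · rw [if_neg h, if_neg h]

-- B's forward fold from position (n - cnt) computes the descending search over (n-cnt, n]
theorem foldl_bStep_eq_du (left right : List String) (cnt : Nat) (hcnt : cnt ≤ right.length)
    (b : Option (List String)) :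
    (List.foldl (bStep left) (right.take (right.length - cnt), b) (right.drop (right.length - cnt))).2
      = match du left right (right.length - cnt) cnt with
        | some v => some v
        | none => b := by
  induction cnt generalizing b with
  | zero => simp [du]
  | succ c ih =>
    have hi : right.length - (c+1) < right.length := by omega
    have hdrop := List.drop_eq_getElem_cons hi
    have htake : List.take (right.length - (c+1)) right ++ [right[right.length - (c+1)]]
        = List.take (right.length - (c+1) + 1) right := by
      rw [← List.take_concat_get hi]; simp [List.concat_eq_append]
    have hstep : right.length - (c+1) + 1 = right.length - c := by omega
    rw [hdrop, List.foldl_cons]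
    show (List.foldl (bStep left) (bStep left (List.take (right.length - (c+1)) right, b)
        right[right.length - (c+1)]) (List.drop (right.length - (c+1) + 1) right)).2 = _
    rw [bStep]
    simp only [htake, hstep]
    have hlen : (List.take (right.length - c) right).length = right.length - c := by
      rw [List.length_take]; omega
    rw [hlen]
    have ihc := ih (Nat.le_of_succ_le hcnt)
      (b := if right.length - c ≤ left.length ∧
          left.drop (left.length - (right.length - c)) = List.take (right.length - c) right
        then some (List.take (right.length - c) right) else b)
    rw [ihc]
    have hpeel := du_peel left right (right.length - (c+1)) c
    rw [hstep] at hpeel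
    rw [hpeel]
    cases du left right (right.length - c) c with
    | some v => rfl
    | none => split_ifs <;> rfl

-- if big is shorter than small, the peel check is false
theorem bContains_short (small : List String) (b : List String)
    (h : b.length < small.length) : bContains small b = false := by
  induction b with
  | nil =>
    have : small ≠ [] := by intro e; rw [e] at h; simp at h
    simp [bContains, this.symm]
  | cons x t ih =>
    have hne : List.take small.length (x :: t) ≠ small := by
      intro e
      have := congrArg List.length e
      simp only [List.length_take, List.length_cons] at this
      simp only [List.length_cons] at h
      omega
    rw [bContains, if_neg hne]
    exact ih (by simp only [List.length_cons] at h; omega)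

-- the empty pattern matches immediately on both sides
theorem aScan_nil (big : List String) (c : Nat) : aScan big [] 0 (c + 1) = some [] := by
  rw [aScan, PySem.List.slice_natCast_add]
  simp

theorem bContains_nil (b : List String) : bContains [] b = true := by
  cases b <;> simp [bContains]

-- A's position scan agrees with B's peel-based containment (nonempty pattern)
theorem aScan_eq_bContains (big small : List String) (cnt i : Nat)
    (hpos : 0 < small.length) (hlen : small.length ≤ big.length)
    (hcnt : i + cnt = big.length - small.length + 1) :
    aScan big small i cnt = (if bContains small (big.drop i) then some small else none) := by
  induction cnt generalizing i with
  | zero =>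
    have : (big.drop i).length < small.length := by
      rw [List.length_drop]; omega
    rw [aScan, bContains_short small _ this]
    simp
  | succ c ih =>
    rw [aScan, PySem.List.slice_natCast_add]
    by_cases h : List.take small.length (List.drop i big) = small
    · rw [if_pos h]
      have hb : bContains small (big.drop i) = true := by
        cases hd : big.drop i with
        | nil => rw [hd] at h; simp at h; simp [bContains, h.symm]
        | cons x t => rw [hd] at h; simp [bContains, h]
      rw [hb]; simp
    · rw [if_neg h]
      have hi : i < big.length := by omega
      have hd := List.drop_eq_getElem_cons hi
      rw [hd]
      have hb : bContains small (big.drop i)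
          = bContains small (big.drop (i+1)) := by
        rw [hd, bContains, if_neg (by rw [← hd]; exact h)]
      rw [← hd, hb]
      exact ih (i+1) (by omega)

-- ===== VERDICT (by name: the statement is the Claim_ definition above) =====
theorem pattern_overlap_py_spec : Claim_equal_pattern_overlap_py := by
  intro left right _
  unfold Spec_pattern_overlap_py pattern_overlap_py pattern_overlap_py_alt
  have hfold := foldl_bStep_eq_du left right right.length (le_refl _) none
  simp only [Nat.sub_self, List.take_zero, List.drop_zero] at hfold
  rw [hfold, aOver_eq_du left right _ (le_refl _),
      ← du_high left right right.length (Nat.min_le_right _ _)]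
  cases du left right 0 right.length with
  | some v => rfl
  | none =>
    by_cases h1 : left.length < right.length
    · simp only [h1, if_pos]
      by_cases hL : left = []
      · subst hL
        have hc : right.length - List.length ([] : List String) + 1 = right.length + 1 := by
          simp
        rw [hc, aScan_nil, bContains_nil]
        simp
      · have hpos : 0 < left.length := List.length_pos_iff.mpr hL
        rw [aScan_eq_bContains right left (right.length - left.length + 1) 0
          hpos (Nat.le_of_lt h1) (by omega)]
        simp
    · by_cases h2 : right.length < left.length
      · simp only [h1, h2, if_pos]
        by_cases hR : right = []
        · subst hR
          have hc : left.length - List.length ([] : List String) + 1 = left.length + 1 := by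
            simp
          rw [hc, aScan_nil, bContains_nil]
          simp
        · have hpos : 0 < right.length := List.length_pos_iff.mpr hR
          rw [aScan_eq_bContains left right (left.length - right.length + 1) 0
            hpos (Nat.le_of_lt h2) (by omega)]
          simp
      · simp [h1, h2]
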